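-- pv_equiv track=rewrite | github.com/moritzteichner/SRWCDD | rmmdcm.py | true_positives
-- ===== SOURCE A (Python) =====
-- def true_positives(true_cps, reported_cps, T=5):
--     true_cps = true_cps.copy()
--     tps = 0
--     for reported_cp in reported_cps:
--         for true_cp in true_cps:
--             if abs(true_cp - reported_cp) <= T:
--                 tps += 1
--                 true_cps.remove(true_cp)
--                 break
--     return tps
-- ===== SOURCE B (Python) =====
-- def true_positives(true_cps, reported_cps, T=5):
--     n = len(true_cps)
--     svals = sorted((t, i) for i, t in enumerate(true_cps))
--     used = [False] * n
--     tps = 0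
--     for r in reported_cps:
--         # first position whose value is >= r - T
--         lo, hi = 0, n
--         while lo < hi:
--             mid = (lo + hi) // 2
--             if svals[mid][0] < r - T:
--                 lo = mid + 1
--             else:
--                 hi = mid
--         # first position whose value is > r + T
--         up, hi2 = lo, n
--         while up < hi2:
--             mid = (up + hi2) // 2
--             if svals[mid][0] <= r + T:
--                 up = mid + 1
--             else:
--                 hi2 = mid
--         # earliest-listed still-available true cp inside the window
--         best = None
--         for p in range(lo, up):
--             if not used[p] and (best is None or svals[p][1] < svals[best][1]):
--                 best = p
--         if best is not None:
--             used[best] = True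
--             tps += 1
--     return tps
-- ===== Notes on version B (the rewrite author's own statement) =====
-- stated objective: alternative
-- what changed: A repeatedly scans and mutates a shrinking copy of true_cps for every reported point; B sorts (value, index) pairs once, binary-searches each reported point's window [r-T, r+T], and scans only that window for the smallest-index unused entry, marking it in a used-array.
import Mathlib
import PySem

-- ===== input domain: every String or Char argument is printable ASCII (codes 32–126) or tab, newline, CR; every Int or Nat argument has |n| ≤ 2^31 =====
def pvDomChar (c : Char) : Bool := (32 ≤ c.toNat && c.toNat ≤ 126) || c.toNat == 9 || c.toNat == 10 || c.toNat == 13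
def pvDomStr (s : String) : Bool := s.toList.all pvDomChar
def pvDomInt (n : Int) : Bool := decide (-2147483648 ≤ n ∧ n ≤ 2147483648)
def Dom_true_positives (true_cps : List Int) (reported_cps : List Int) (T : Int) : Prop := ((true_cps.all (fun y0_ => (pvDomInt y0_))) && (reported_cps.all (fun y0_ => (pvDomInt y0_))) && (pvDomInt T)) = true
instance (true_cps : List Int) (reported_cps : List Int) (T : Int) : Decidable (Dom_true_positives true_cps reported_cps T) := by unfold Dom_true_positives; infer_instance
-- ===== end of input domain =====

-- B replaces A's rescans of the shrinking list by sorting the true change points once and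
-- binary-searching each reported point's window ±T, scanning only that window for the
-- earliest-listed still-available true change point (objective: alternative).

-- ===== PORT A =====
-- inner 'for true_cp in true_cps: if abs(...) <= T: ... break' — first element within T
def findMatchA (remaining : List Int) (r T : Int) : Option Int :=
  match remaining with
  | [] => none
  | t :: ts => if |t - r| ≤ T then some t else findMatchA ts r T

-- body of 'for reported_cp in reported_cps': on a match, tps += 1 and remove the value
def stepA (T : Int) (st : List Int × Int) (r : Int) : List Int × Int :=
  match findMatchA st.1 r T with
  | some t => ((PySem.List.remove? st.1 t).getD st.1, st.2 + 1)
  | none => st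

def true_positives (true_cps : List Int) (reported_cps : List Int) (T : Int) : Int :=
  (reported_cps.foldl (stepA T) (true_cps, 0)).2

-- ===== PORT B =====
-- the two hand-written 'while lo < hi' binary searches of Source B (ok v = "go right of v")
def bsearchB (sv : List (Int × Int)) (ok : Int → Bool) (lo hi : Nat) : Nat :=
  if h : lo < hi then
    let mid := (lo + hi) / 2
    if ok (sv.getD mid (0, 0)).1 then bsearchB sv ok (mid + 1) hi
    else bsearchB sv ok lo mid
  else lo
termination_by hi - lo
decreasing_by all_goals omega

-- body of 'for p in range(lo, up)': keep the position with the smallest original index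
def scanStep (sv : List (Int × Int)) (used : List Bool) (best : Option Nat) (p : Nat) : Option Nat :=
  if (!(used.getD p false) &&
      (match best with
       | none => true
       | some b => decide ((sv.getD p (0, 0)).2 < (sv.getD b (0, 0)).2))) then
    some p
  else best

def scanBest (sv : List (Int × Int)) (used : List Bool) (lo up : Nat) : Option Nat :=
  (List.range' lo (up - lo)).foldl (scanStep sv used) none

-- body of 'for r in reported_cps'
def stepB (sv : List (Int × Int)) (n : Nat) (T : Int) (st : List Bool × Int) (r : Int) : List Bool × Int :=
  let lo := bsearchB sv (fun v => decide (v < r - T)) 0 n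
  let up := bsearchB sv (fun v => decide (v ≤ r + T)) lo n
  match scanBest sv st.1 lo up with
  | some p => (st.1.set p true, st.2 + 1)
  | none => st

-- svals = sorted((t, i) for i, t in enumerate(true_cps))
def svOf (true_cps : List Int) : List (Int × Int) :=
  PySem.List.sorted2 ((PySem.List.enumerate true_cps).map (fun q => (q.2, q.1)))
    (fun q => q.1) (fun q => q.2) false

def true_positives_alt (true_cps : List Int) (reported_cps : List Int) (T : Int) : Int :=
  let n := true_cps.length
  let sv := svOf true_cps
  (reported_cps.foldl (stepB sv n T) (List.replicate n false, 0)).2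

-- ===== PRECONDITION & SPEC =====
def Spec_true_positives (true_cps : List Int) (reported_cps : List Int) (T : Int) (out : Int) : Prop := out = true_positives_alt true_cps reported_cps T
instance (true_cps : List Int) (reported_cps : List Int) (T : Int) (out : Int) : Decidable (Spec_true_positives true_cps reported_cps T out) := by unfold Spec_true_positives; infer_instance

-- ===== CLAIM (what is proved, stated in full; the proofs are below) =====
def Claim_equal_true_positives : Prop := ∀ (true_cps : List Int) (reported_cps : List Int) (T : Int), Dom_true_positives true_cps reported_cps T → Spec_true_positives true_cps reported_cps T (true_positives true_cps reported_cps T)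

-- ===== LEMMAS AND PROOFS =====

-- position of original index i in the sorted array (unique since indices are distinct)
def posOf (sv : List (Int × Int)) (i : Int) : Nat := (sv.map (·.2)).idxOf i

-- "original index i is still available" read off B's used-array
def availOf (sv : List (Int × Int)) (used : List Bool) (q : Int × Int) : Bool :=
  !(used.getD (posOf sv q.1) false)

-- A's remaining list, reconstructed from B's state
def remOf (true_cps : List Int) (used : List Bool) : List Int :=
  ((PySem.List.enumerate true_cps).filter (availOf (svOf true_cps) used)).map (·.2)

lemma sv_perm (tc : List Int) :
    (svOf tc).Perm ((PySem.List.enumerate tc).map (fun q => (q.2, q.1))) :=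
  PySem.List.sorted2_perm _ _ _ _

lemma sv_length (tc : List Int) : (svOf tc).length = tc.length := by
  rw [(sv_perm tc).length_eq]
  simp [PySem.List.length_enumerate]

lemma pairwise_insertBy {α : Type} (R : α → α → Prop) (before : α → α → Bool)
    (htrans : ∀ a b c, R a b → R b c → R a c)
    (h1 : ∀ a b, before a b = true → R a b)
    (h2 : ∀ a b, before a b = false → R b a)
    (x : α) (l : List α) (hl : l.Pairwise R) :
    (PySem.List.insertBy before x l).Pairwise R := by
  induction l with
  | nil => simp [PySem.List.insertBy]
  | cons y ys ih =>
    rw [List.pairwise_cons] at hl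
    obtain ⟨hy, hys⟩ := hl
    rw [PySem.List.insertBy]
    rcases hxy : before x y with hf | ht
    · simp only [Bool.false_eq_true, if_false]
      refine List.Pairwise.cons ?_ (ih hys)
      intro z hz
      rcases (PySem.List.mem_insertBy _ _ _ _).1 hz with rfl | hz'
      · exact h2 _ _ hxy
      · exact hy _ hz'
    · simp only [if_true]
      refine List.Pairwise.cons ?_ (List.pairwise_cons.2 ⟨hy, hys⟩)
      intro z hz
      rcases List.mem_cons.1 hz with rfl | hz'
      · exact h1 _ _ hxy
      · exact htrans _ _ _ (h1 _ _ hxy) (hy _ hz')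

lemma sv_sorted (tc : List Int) : (svOf tc).Pairwise (fun a b => a.1 ≤ b.1) := by
  have key : ∀ (l acc : List (Int × Int)), acc.Pairwise (fun a b => a.1 ≤ b.1) →
      (l.foldl (fun acc x => PySem.List.insertBy
        (fun a b => decide (a.1 < b.1) || !decide (b.1 < a.1) && decide (a.2 < b.2)) x acc) acc).Pairwise
        (fun a b => a.1 ≤ b.1) := by
    intro l
    induction l with
    | nil => intro acc h; exact h
    | cons x xs ih =>
      intro acc h
      exact ih _ (pairwise_insertBy (fun (a b : Int × Int) => a.1 ≤ b.1) _ (fun a b c h1 h2 => le_trans h1 h2)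
        (by intro a b hb
            show a.1 ≤ b.1
            by_contra hc
            rw [not_le] at hc
            simp [show ¬(a.1 < b.1) by omega, show b.1 < a.1 from hc] at hb)
        (by intro a b hb
            show b.1 ≤ a.1
            by_contra hc
            rw [not_le] at hc
            simp [hc] at hb) x acc h)
  have : svOf tc = ((PySem.List.enumerate tc).map (fun q => (q.2, q.1))).foldl
      (fun acc x => PySem.List.insertBy
        (fun a b => decide (a.1 < b.1) || !decide (b.1 < a.1) && decide (a.2 < b.2)) x acc) [] := rfl
  rw [this]
  exact key _ _ List.Pairwise.nil

lemma sv_fst_mono (tc : List Int) {p q : Nat} (hpq : p ≤ q) (hq : q < (svOf tc).length) :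
    ((svOf tc).getD p (0,0)).1 ≤ ((svOf tc).getD q (0,0)).1 := by
  have hp : p < (svOf tc).length := lt_of_le_of_lt hpq hq
  rw [List.getD_eq_getElem _ _ hp, List.getD_eq_getElem _ _ hq]
  rcases lt_or_eq_of_le hpq with h | h
  · exact (List.pairwise_iff_getElem.1 (sv_sorted tc)) p q hp hq h
  · subst h; exact le_refl _

lemma en_fst_nodup (tc : List Int) :
    ((PySem.List.enumerate tc).map (·.1)).Nodup := by
  have h := PySem.List.pairwise_lt_enumerate tc 0
  unfold List.Nodup
  rw [List.pairwise_map]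
  exact h.imp (fun hlt => ne_of_lt hlt)

lemma en_fst_inj (tc : List Int) {q q' : Int × Int}
    (h : q ∈ PySem.List.enumerate tc) (h' : q' ∈ PySem.List.enumerate tc) (he : q.1 = q'.1) :
    q = q' := by
  rw [PySem.List.mem_enumerate_iff] at h h'
  obtain ⟨k, hk, rfl⟩ := h
  obtain ⟨k', hk', rfl⟩ := h'
  simp only [zero_add] at he ⊢
  have : k = k' := by exact_mod_cast he
  subst this
  rfl

lemma sv_snd_nodup (tc : List Int) : ((svOf tc).map (·.2)).Nodup := by
  have hperm := (sv_perm tc).map (·.2)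
  rw [hperm.nodup_iff, List.map_map]
  exact en_fst_nodup tc

lemma mem_sv_iff (tc : List Int) (q : Int × Int) :
    q ∈ svOf tc ↔ (q.2, q.1) ∈ PySem.List.enumerate tc := by
  rw [(sv_perm tc).mem_iff, List.mem_map]
  constructor
  · rintro ⟨x, hx, rfl⟩; exact hx
  · intro h; exact ⟨(q.2, q.1), h, rfl⟩

lemma posOf_getElem (tc : List Int) (p : Nat) (hp : p < (svOf tc).length) :
    posOf (svOf tc) ((svOf tc)[p].2) = p := by
  have hp' : p < ((svOf tc).map (·.2)).length := by simpa using hp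
  have h1 := List.Nodup.idxOf_getElem (sv_snd_nodup tc) p hp'
  unfold posOf
  have h2 : (List.map (fun x => x.2) (svOf tc))[p]'hp' = (svOf tc)[p].2 := by simp
  rw [← h2]
  exact h1

lemma posOf_mem (tc : List Int) {i v : Int} (h : (i, v) ∈ PySem.List.enumerate tc) :
    ∃ hp : posOf (svOf tc) i < (svOf tc).length, (svOf tc)[posOf (svOf tc) i] = (v, i) := by
  have hmem : (v, i) ∈ svOf tc := by
    rw [mem_sv_iff]; exact h
  have hi : i ∈ (svOf tc).map (·.2) := List.mem_map.2 ⟨(v, i), hmem, rfl⟩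
  have hlt : posOf (svOf tc) i < ((svOf tc).map (·.2)).length :=
    List.idxOf_lt_length_of_mem hi
  have hget : ((svOf tc).map (·.2))[posOf (svOf tc) i] = i := List.getElem_idxOf hlt
  have hp : posOf (svOf tc) i < (svOf tc).length := by simpa using hlt
  refine ⟨hp, ?_⟩
  rw [List.getElem_map] at hget
  have hmem2 : ((svOf tc)[posOf (svOf tc) i].2, (svOf tc)[posOf (svOf tc) i].1) ∈
      PySem.List.enumerate tc := by
    rw [← mem_sv_iff]; exact List.getElem_mem hp
  rw [hget] at hmem2
  have := en_fst_inj tc hmem2 h rfl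
  have h1 : (svOf tc)[posOf (svOf tc) i].1 = v := congrArg Prod.snd this
  exact Prod.ext (by rw [h1]) (by rw [hget])

lemma bsearchB_spec (sv : List (Int × Int)) (ok : Int → Bool)
    (hmono : ∀ p q, p ≤ q → q < sv.length →
      ok (sv.getD q (0,0)).1 = true → ok (sv.getD p (0,0)).1 = true) :
    ∀ k lo hi, hi - lo = k → lo ≤ hi → hi ≤ sv.length →
      (∀ p, hi ≤ p → p < sv.length → ok (sv.getD p (0,0)).1 = false) →
      lo ≤ bsearchB sv ok lo hi ∧ bsearchB sv ok lo hi ≤ hi ∧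
      (∀ p, lo ≤ p → p < bsearchB sv ok lo hi → ok (sv.getD p (0,0)).1 = true) ∧
      (∀ p, bsearchB sv ok lo hi ≤ p → p < sv.length → ok (sv.getD p (0,0)).1 = false) := by
  intro k
  induction k using Nat.strong_induction_on with
  | _ k ih =>
    intro lo hi hk hlohi hhi hup
    rw [bsearchB]
    by_cases h : lo < hi
    · rw [dif_pos h]
      simp only []
      rcases hok : ok (sv.getD ((lo + hi) / 2) (0, 0)).1 with hf | ht
      · simp only [Bool.false_eq_true, if_false]
        obtain ⟨h1, h2, h3, h4⟩ := ih ((lo + hi) / 2 - lo) (by omega) lo ((lo + hi) / 2)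
          rfl (by omega) (by omega) (by
            intro p hp1 hp2
            rcases hok2 : ok (sv.getD p (0,0)).1 with hf2 | ht2
            · rfl
            · have := hmono ((lo + hi) / 2) p hp1 hp2 hok2
              rw [this] at hok
              exact absurd hok (by decide))
        exact ⟨h1, by omega, h3, h4⟩
      · simp only [if_true]
        obtain ⟨h1, h2, h3, h4⟩ := ih (hi - ((lo + hi) / 2 + 1)) (by omega) ((lo + hi) / 2 + 1) hi
          rfl (by omega) hhi hup
        refine ⟨by omega, h2, ?_, h4⟩
        intro p hp1 hp2
        by_cases hp3 : (lo + hi) / 2 + 1 ≤ p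
        · exact h3 p hp3 hp2
        · exact hmono p ((lo + hi) / 2) (by omega) (by omega) hok
    · rw [dif_neg h]
      exact ⟨le_refl _, by omega, by omega, fun p hp1 hp2 => hup p (by omega) hp2⟩

lemma scan_go (sv : List (Int × Int)) (used : List Bool) :
    ∀ (ps : List Nat) (acc : Option Nat),
      (ps.foldl (scanStep sv used) acc = none →
        acc = none ∧ ∀ p ∈ ps, used.getD p false = true) ∧
      (∀ p', ps.foldl (scanStep sv used) acc = some p' →
        ((p' ∈ ps ∧ used.getD p' false = false) ∨ acc = some p') ∧
        (∀ q ∈ ps, used.getD q false = false → (sv.getD p' (0,0)).2 ≤ (sv.getD q (0,0)).2) ∧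
        (∀ b, acc = some b → (sv.getD p' (0,0)).2 ≤ (sv.getD b (0,0)).2)) := by
  intro ps
  induction ps with
  | nil =>
    intro acc
    simp only [List.foldl_nil]
    constructor
    · intro h
      exact ⟨h, by simp⟩
    · intro p' h
      refine ⟨Or.inr h, by simp, ?_⟩
      intro b hb
      rw [hb] at h
      cases h
      exact le_refl _
  | cons p ps ih =>
    intro acc
    simp only [List.foldl_cons]
    rcases hcond : (!(used.getD p false) &&
        (match acc with
         | none => true
         | some b => decide ((sv.getD p (0, 0)).2 < (sv.getD b (0, 0)).2))) with hf | ht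
    · -- condition false: accumulator unchanged
      have hstep : scanStep sv used acc p = acc := by
        unfold scanStep
        rw [hcond]
        simp
      rw [hstep]
      constructor
      · intro hres
        obtain ⟨hacc, hall⟩ := (ih acc).1 hres
        subst hacc
        refine ⟨rfl, ?_⟩
        intro q hq
        rcases List.mem_cons.1 hq with rfl | hq'
        · -- from hcond with acc = none: match = true, so !getD = false
          rcases hget : used.getD q false with hgf | hgt
          · rw [hget] at hcond; simp at hcond
          · rfl
        · exact hall q hq'
      · intro p' hres
        obtain ⟨hmem, hmin, haccmin⟩ := (ih acc).2 p' hres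
        refine ⟨?_, ?_, haccmin⟩
        · rcases hmem with ⟨hm, hu⟩ | hm
          · exact Or.inl ⟨List.mem_cons_of_mem _ hm, hu⟩
          · exact Or.inr hm
        · intro q hq hu
          rcases List.mem_cons.1 hq with rfl | hq'
          · -- q = p, condition false but getD p = false: so acc = some b with key b ≤ key p
            rw [hu] at hcond
            simp only [Bool.not_false, Bool.true_and] at hcond
            rcases hacc : acc with _ | b
            · rw [hacc] at hcond; simp at hcond
            · rw [hacc] at hcond
              simp only [decide_eq_false_iff_not, not_lt] at hcond
              exact le_trans (haccmin b hacc) hcond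
          · exact hmin q hq' hu
    · -- condition true: accumulator becomes some p
      have hstep : scanStep sv used acc p = some p := by
        unfold scanStep
        rw [hcond]
        simp
      rw [hstep]
      have hgetp : used.getD p false = false := by
        rcases hget : used.getD p false with hgf | hgt
        · rfl
        · rw [hget] at hcond; simp at hcond
      constructor
      · intro hres
        obtain ⟨hacc, _⟩ := (ih (some p)).1 hres
        cases hacc
      · intro p' hres
        obtain ⟨hmem, hmin, haccmin⟩ := (ih (some p)).2 p' hres
        have hkey_p : (sv.getD p' (0,0)).2 ≤ (sv.getD p (0,0)).2 := haccmin p rfl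
        refine ⟨?_, ?_, ?_⟩
        · rcases hmem with ⟨hm, hu⟩ | hm
          · exact Or.inl ⟨List.mem_cons_of_mem _ hm, hu⟩
          · cases hm
            exact Or.inl ⟨List.mem_cons_self, hgetp⟩
        · intro q hq hu
          rcases List.mem_cons.1 hq with rfl | hq'
          · exact hkey_p
          · exact hmin q hq' hu
        · intro b hb
          rw [hb] at hcond
          simp only [Bool.and_eq_true, decide_eq_true_eq] at hcond
          exact le_trans hkey_p (le_of_lt hcond.2)

lemma findMatchA_eq_find? (l : List Int) (r T : Int) :
    findMatchA l r T = l.find? (fun t => decide (|t - r| ≤ T)) := by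
  induction l with
  | nil => rfl
  | cons t ts ih => by_cases h : |t - r| ≤ T <;> simp [findMatchA, h, ih]

lemma erase_eq_eraseP {l : List Int} {p : Int → Bool} {v : Int}
    (h : l.find? p = some v) : l.erase v = l.eraseP p := by
  induction l with
  | nil => simp at h
  | cons x xs ih =>
    rw [List.find?_cons] at h
    rcases hpx : p x with hf | ht
    · rw [hpx] at h
      have h : List.find? p xs = some v := h
      have hpv : p v = true := List.find?_some h
      have hxv : x ≠ v := fun he => by subst he; rw [hpv] at hpx; exact absurd hpx (by decide)
      rw [List.erase_cons_tail (by simpa using hxv), List.eraseP_cons_of_neg (by simp [hpx]), ih h]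
    · rw [hpx] at h
      simp only [Option.some.injEq] at h
      subst h
      rw [List.erase_cons_head, List.eraseP_cons_of_pos hpx]

lemma eraseP_filter (l : List (Int × Int)) (a : Int × Int → Bool) (pr : Int × Int → Bool)
    (q0 : Int × Int) (hnd : (l.map (·.1)).Nodup)
    (hfind : l.find? (fun q => a q && pr q) = some q0) :
    (l.filter a).eraseP pr = l.filter (fun q => a q && !(q.1 == q0.1)) := by
  induction l with
  | nil => simp at hfind
  | cons h t ih =>
    have hnd' : (t.map (·.1)).Nodup := (List.nodup_cons.1 hnd).2
    have hhd : h.1 ∉ t.map (·.1) := (List.nodup_cons.1 hnd).1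
    rw [List.find?_cons] at hfind
    rcases ha : a h with haf | hat
    · -- a h = false: h dropped from both filters
      rw [ha] at hfind
      simp only [Bool.false_and] at hfind
      rw [List.filter_cons_of_neg (by simp [ha]), List.filter_cons_of_neg (by simp [ha]),
        ih hnd' hfind]
    · rcases hpr : pr h with hprf | hprt
      · -- kept by filter, not erased here
        rw [ha, hpr] at hfind
        simp only [Bool.and_false] at hfind
        have hq0t : q0 ∈ t := by
          have := List.mem_of_find?_eq_some hfind
          exact this
        have hne : h.1 ≠ q0.1 := by
          intro he
          exact hhd (he ▸ List.mem_map.2 ⟨q0, hq0t, rfl⟩)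
        rw [List.filter_cons_of_pos (by simp [ha]), List.eraseP_cons_of_neg (by simp [hpr]),
          List.filter_cons_of_pos (by simp [ha, hne]), ih hnd' hfind]
      · -- h is the found element
        rw [ha, hpr] at hfind
        simp only [Bool.and_true] at hfind
        injection hfind with hfind
        subst hfind
        rw [List.filter_cons_of_pos (by simp [ha]), List.eraseP_cons_of_pos hpr,
          List.filter_cons_of_neg (by simp [ha])]
        apply List.filter_congr
        intro q hq
        have : q.1 ≠ h.1 := by
          intro he
          exact hhd (he ▸ List.mem_map.2 ⟨q, hq, rfl⟩)
        simp [this]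

-- the single-reported-point correspondence
lemma step_corresp (tc : List Int) (T : Int) (used : List Bool) (c r : Int)
    (hlen : used.length = tc.length) :
    stepA T (remOf tc used, c) r =
      ((remOf tc (stepB (svOf tc) tc.length T (used, c) r).1),
        (stepB (svOf tc) tc.length T (used, c) r).2) ∧
    (stepB (svOf tc) tc.length T (used, c) r).1.length = tc.length := by
  have hsvlen : (svOf tc).length = tc.length := sv_length tc
  -- binary-search specs for the two windows
  have hmono1 : ∀ p q, p ≤ q → q < (svOf tc).length →
      decide (((svOf tc).getD q (0,0)).1 < r - T) = true →
      decide (((svOf tc).getD p (0,0)).1 < r - T) = true := by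
    intro p q hpq hq h
    simp only [decide_eq_true_eq] at h ⊢
    exact lt_of_le_of_lt (sv_fst_mono tc hpq hq) h
  have hmono2 : ∀ p q, p ≤ q → q < (svOf tc).length →
      decide (((svOf tc).getD q (0,0)).1 ≤ r + T) = true →
      decide (((svOf tc).getD p (0,0)).1 ≤ r + T) = true := by
    intro p q hpq hq h
    simp only [decide_eq_true_eq] at h ⊢
    exact le_trans (sv_fst_mono tc hpq hq) h
  obtain ⟨hlo1, hlo2, hloT, hloF⟩ := bsearchB_spec (svOf tc) (fun v => decide (v < r - T))
    hmono1 tc.length 0 tc.length (by omega) (by omega) (by omega)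
    (fun p hp1 hp2 => absurd hp2 (by omega))
  set lo := bsearchB (svOf tc) (fun v => decide (v < r - T)) 0 tc.length with hlo_def
  obtain ⟨hup1, hup2, hupT, hupF⟩ := bsearchB_spec (svOf tc) (fun v => decide (v ≤ r + T))
    hmono2 (tc.length - lo) lo tc.length rfl hlo2 (by omega)
    (fun p hp1 hp2 => absurd hp2 (by omega))
  set up := bsearchB (svOf tc) (fun v => decide (v ≤ r + T)) lo tc.length with hup_def
  -- the window [lo, up) is exactly |value - r| ≤ T
  have hwin : ∀ p, p < tc.length →
      ((lo ≤ p ∧ p < up) ↔ |((svOf tc).getD p (0,0)).1 - r| ≤ T) := by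
    intro p hp
    constructor
    · rintro ⟨h1, h2⟩
      have hf := hloF p h1 (by omega)
      have ht := hupT p h1 h2
      simp only [decide_eq_true_eq, decide_eq_false_iff_not] at hf ht
      rw [abs_le]
      omega
    · intro habs
      rw [abs_le] at habs
      constructor
      · by_contra hc
        rw [not_le] at hc
        have := hloT p (by omega) hc
        simp only [decide_eq_true_eq] at this
        omega
      · by_contra hc
        rw [not_lt] at hc
        have := hupF p hc (by omega)
        simp only [decide_eq_false_iff_not] at this
        omega
  -- A's inner loop as find? on the enumerated list
  have hAfind : findMatchA (remOf tc used) r T =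
      ((PySem.List.enumerate tc).find?
        (fun q => availOf (svOf tc) used q && decide (|q.2 - r| ≤ T))).map (·.2) := by
    rw [findMatchA_eq_find?]
    unfold remOf
    rw [List.find?_map, List.find?_filter]
    have hfun : (fun a => decide (availOf (svOf tc) used a = true ∧
        ((fun t => decide (|t - r| ≤ T)) ∘ fun x => x.2) a = true)) =
        (fun q : Int × Int => availOf (svOf tc) used q && decide (|q.2 - r| ≤ T)) := by
      funext q
      cases h1 : availOf (svOf tc) used q <;> cases h2 : decide (|q.2 - r| ≤ T) <;>
        simp_all
    rw [hfun]
  -- a good window position yields a good enumerated pair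
  have hq'good : ∀ p' (hp'sv : p' < (svOf tc).length), lo ≤ p' → p' < up → used.getD p' false = false →
      (((svOf tc)[p']'hp'sv).2, ((svOf tc)[p']'hp'sv).1) ∈ PySem.List.enumerate tc ∧
      (availOf (svOf tc) used (((svOf tc)[p']'hp'sv).2, ((svOf tc)[p']'hp'sv).1) &&
        decide (|(((svOf tc)[p']'hp'sv).2, ((svOf tc)[p']'hp'sv).1).2 - r| ≤ T)) = true := by
    intro p' hp'sv h1 h2 hu
    have hgd : (svOf tc).getD p' (0,0) = (svOf tc)[p'] := List.getD_eq_getElem _ _ hp'sv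
    constructor
    · rw [← mem_sv_iff]
      exact List.getElem_mem hp'sv
    · have havail : availOf (svOf tc) used (((svOf tc)[p']).2, ((svOf tc)[p']).1) = true := by
        unfold availOf
        simp only []
        rw [posOf_getElem tc p' hp'sv, hu]
        rfl
      have habs : |((svOf tc)[p']).1 - r| ≤ T := by
        have := (hwin p' (by omega)).1 ⟨h1, h2⟩
        rw [hgd] at this
        exact this
      rw [havail]
      simp only [Bool.true_and, decide_eq_true_eq]
      exact habs
  rcases hfind : (PySem.List.enumerate tc).find?
      (fun q => availOf (svOf tc) used q && decide (|q.2 - r| ≤ T)) with _ | q0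
  · -- no available true change point within T : both sides leave the state unchanged
    have hscan : scanBest (svOf tc) used lo up = none := by
      rcases hscan' : scanBest (svOf tc) used lo up with _ | p'
      · rfl
      · exfalso
        obtain ⟨hmem, hmin, _⟩ :=
          (scan_go (svOf tc) used (List.range' lo (up - lo)) none).2 p' hscan'
        rcases hmem with ⟨hm, hu⟩ | hm
        · obtain ⟨hmlo, hmup⟩ := List.mem_range'_1.1 hm
          have hp'up : p' < up := by omega
          obtain ⟨hq'en, hq'P⟩ := hq'good p' (by omega) hmlo hp'up hu
          exact absurd hq'P (by
            have := List.find?_eq_none.1 hfind _ hq'en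
            simpa using this)
        · cases hm
    have hA : stepA T (remOf tc used, c) r = (remOf tc used, c) := by
      unfold stepA
      rw [hAfind, hfind]
      rfl
    have hB : stepB (svOf tc) tc.length T (used, c) r = (used, c) := by
      unfold stepB
      simp only []
      rw [← hlo_def, ← hup_def, hscan]
    rw [hA, hB]
    exact ⟨rfl, hlen⟩
  · -- q0 = first still-available enumerated pair within T; B picks the same element
    have hPq0 := List.find?_some hfind
    have hq0en : q0 ∈ PySem.List.enumerate tc := List.mem_of_find?_eq_some hfind
    rw [Bool.and_eq_true] at hPq0
    obtain ⟨havail0, habs0⟩ := hPq0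
    have habs0' : |q0.2 - r| ≤ T := of_decide_eq_true habs0
    obtain ⟨hp0, hsv0⟩ := posOf_mem tc (show (q0.1, q0.2) ∈ PySem.List.enumerate tc by
      simpa using hq0en)
    have hu0 : used.getD (posOf (svOf tc) q0.1) false = false := by
      unfold availOf at havail0
      simpa using havail0
    have hp0n : posOf (svOf tc) q0.1 < tc.length := by omega
    have hgd0 : (svOf tc).getD (posOf (svOf tc) q0.1) (0,0) =
        (svOf tc)[posOf (svOf tc) q0.1] := List.getD_eq_getElem _ _ hp0
    have hwin0 : lo ≤ posOf (svOf tc) q0.1 ∧ posOf (svOf tc) q0.1 < up := by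
      apply (hwin _ hp0n).2
      rw [hgd0, hsv0]
      exact habs0'
    have hp0range : posOf (svOf tc) q0.1 ∈ List.range' lo (up - lo) :=
      List.mem_range'_1.2 ⟨hwin0.1, by omega⟩
    obtain ⟨-, as, bs, hen_eq, has⟩ := List.find?_eq_some_iff_append.1 hfind
    have hAmin : ∀ q ∈ PySem.List.enumerate tc,
        (availOf (svOf tc) used q && decide (|q.2 - r| ≤ T)) = true → q0.1 ≤ q.1 := by
      intro q hq hPq
      have hpw := PySem.List.pairwise_lt_enumerate tc 0
      rw [hen_eq] at hpw hq
      rcases List.mem_append.1 hq with h | h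
      · have := has q h
        rw [hPq] at this
        exact absurd this (by decide)
      · rcases List.mem_cons.1 h with rfl | h'
        · exact le_refl _
        · exact le_of_lt ((List.pairwise_cons.1 (List.pairwise_append.1 hpw).2.1).1 q h')
    rcases hscan : scanBest (svOf tc) used lo up with _ | p'
    · exfalso
      have hall := (scan_go (svOf tc) used (List.range' lo (up - lo)) none).1 hscan
      have := hall.2 _ hp0range
      rw [hu0] at this
      exact absurd this (by decide)
    · obtain ⟨hmem, hmin, -⟩ :=
        (scan_go (svOf tc) used (List.range' lo (up - lo)) none).2 p' hscan
      rcases hmem with ⟨hm, hu'⟩ | hm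
      swap
      · cases hm
      obtain ⟨hmlo, hmup'⟩ := List.mem_range'_1.1 hm
      have hp'up : p' < up := by omega
      have hp'sv : p' < (svOf tc).length := by omega
      obtain ⟨hq'en, hq'P⟩ := hq'good p' hp'sv hmlo hp'up hu'
      have hBmin : ((svOf tc).getD p' (0,0)).2 ≤ ((svOf tc).getD (posOf (svOf tc) q0.1) (0,0)).2 :=
        hmin _ hp0range hu0
      have hAmin' := hAmin _ hq'en hq'P
      have hgd' : (svOf tc).getD p' (0,0) = (svOf tc)[p'] := List.getD_eq_getElem _ _ hp'sv
      have hkey_eq : ((svOf tc)[p']'hp'sv).2 = q0.1 := by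
        have h1 : ((svOf tc)[p']'hp'sv).2 ≤ q0.1 := by
          have := hBmin
          rw [hgd', hgd0, hsv0] at this
          exact this
        have h2 : q0.1 ≤ ((svOf tc)[p']'hp'sv).2 := by simpa using hAmin'
        omega
      have hp'p0 : p' = posOf (svOf tc) q0.1 := by
        have := posOf_getElem tc p' hp'sv
        rw [hkey_eq] at this
        exact this.symm
      rw [hp'p0] at hscan
      -- A's step removes exactly q0
      have hremA : q0.2 ∈ remOf tc used := by
        unfold remOf
        exact List.mem_map.2 ⟨q0, List.mem_filter.2 ⟨hq0en, havail0⟩, rfl⟩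
      have hfindA : (remOf tc used).find? (fun t => decide (|t - r| ≤ T)) = some q0.2 := by
        have h := hAfind
        rw [hfind, findMatchA_eq_find?] at h
        simpa using h
      have hstepA : stepA T (remOf tc used, c) r =
          ((remOf tc used).eraseP (fun t => decide (|t - r| ≤ T)), c + 1) := by
        unfold stepA
        rw [hAfind, hfind]
        simp only [Option.map_some]
        rw [PySem.List.remove?_eq_some_erase _ _ hremA]
        simp only [Option.getD_some]
        rw [erase_eq_eraseP hfindA]
      have heraseP : (remOf tc used).eraseP (fun t => decide (|t - r| ≤ T)) =
          ((PySem.List.enumerate tc).filter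
            (fun q => availOf (svOf tc) used q && !(q.1 == q0.1))).map (·.2) := by
        unfold remOf
        rw [List.eraseP_map]
        have hfun2 : ((fun t => decide (|t - r| ≤ T)) ∘ fun x : Int × Int => x.2) =
            (fun q : Int × Int => decide (|q.2 - r| ≤ T)) := rfl
        rw [hfun2, eraseP_filter (PySem.List.enumerate tc) _ _ q0 (en_fst_nodup tc) hfind]
      have hstepB : stepB (svOf tc) tc.length T (used, c) r =
          (used.set (posOf (svOf tc) q0.1) true, c + 1) := by
        unfold stepB
        simp only []
        rw [← hlo_def, ← hup_def, hscan]
      have hfiltereq : remOf tc (used.set (posOf (svOf tc) q0.1) true) =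
          ((PySem.List.enumerate tc).filter
            (fun q => availOf (svOf tc) used q && !(q.1 == q0.1))).map (·.2) := by
        unfold remOf
        congr 1
        apply List.filter_congr
        intro q hq
        obtain ⟨hpq, hsvq⟩ := posOf_mem tc (show (q.1, q.2) ∈ PySem.List.enumerate tc by
          simpa using hq)
        unfold availOf
        by_cases hqe : q.1 = q0.1
        · rw [hqe]
          have hset : (used.set (posOf (svOf tc) q0.1) true).getD (posOf (svOf tc) q0.1) false =
              true := by
            rw [List.getD_eq_getElem _ _ (by
              rw [List.length_set, hlen]
              exact hp0n)]
            rw [List.getElem_set]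
            simp
          rw [hset]
          simp
        · have hne : posOf (svOf tc) q.1 ≠ posOf (svOf tc) q0.1 := by
            intro he
            apply hqe
            have h1 : (svOf tc)[posOf (svOf tc) q.1]? = some (q.2, q.1) := by
              rw [List.getElem?_eq_getElem hpq, hsvq]
            have h2 : (svOf tc)[posOf (svOf tc) q0.1]? = some (q0.2, q0.1) := by
              rw [List.getElem?_eq_getElem hp0, hsv0]
            rw [he, h2] at h1
            injection h1 with h1
            exact (congrArg Prod.snd h1).symm
          have hpq' : posOf (svOf tc) q.1 < used.length := by
            rw [hlen]
            omega
          have hset : (used.set (posOf (svOf tc) q0.1) true).getD (posOf (svOf tc) q.1) false =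
              used.getD (posOf (svOf tc) q.1) false := by
            rw [List.getD_eq_getElem _ _ (by rw [List.length_set]; exact hpq'),
              List.getD_eq_getElem _ _ hpq', List.getElem_set]
            rw [if_neg (Ne.symm hne)]
          rw [hset]
          simp [hqe]
      rw [hstepA, hstepB]
      refine ⟨?_, by rw [List.length_set]; exact hlen⟩
      rw [heraseP, hfiltereq]

lemma fold_corresp (tc : List Int) (T : Int) :
    ∀ (rs : List Int) (used : List Bool) (c : Int), used.length = tc.length →
      rs.foldl (stepA T) (remOf tc used, c) =
        ((remOf tc (rs.foldl (stepB (svOf tc) tc.length T) (used, c)).1),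
          (rs.foldl (stepB (svOf tc) tc.length T) (used, c)).2) ∧
      (rs.foldl (stepB (svOf tc) tc.length T) (used, c)).1.length = tc.length := by
  intro rs
  induction rs with
  | nil => intro used c hlen; exact ⟨rfl, hlen⟩
  | cons r rs ih =>
    intro used c hlen
    simp only [List.foldl_cons]
    have hs := step_corresp tc T used c r hlen
    rw [hs.1]
    exact ih _ _ hs.2

lemma remOf_init (tc : List Int) : remOf tc (List.replicate tc.length false) = tc := by
  unfold remOf
  rw [List.filter_eq_self.2 (by
    intro q hq
    unfold availOf
    simp only [List.getD, List.getElem?_replicate]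
    split <;> simp)]
  exact PySem.List.map_snd_enumerate tc 0

-- ===== VERDICT (by name: the statement is the Claim_ definition above) =====
theorem true_positives_spec : Claim_equal_true_positives := by
  intro tc rs T _
  unfold Spec_true_positives true_positives true_positives_alt
  have h := fold_corresp tc T rs (List.replicate tc.length false) 0 (by simp)
  rw [remOf_init] at h
  rw [h.1]
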